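-- pv_equiv track=rewrite | github.com/mvantellingen/django-rangepaginator | src/django_rangepaginator/layout.py | calculate_pages
-- ===== SOURCE A (Python) =====
-- def calculate_pages(current, total, distance=2, edge=1):
--     center = min(max(distance + 1, current), total - distance)
--     add_skip_start = add_skip_end = False
--     pages = set()
--
--     # Add the page numbers on the start
--     for i in range(1, edge + 1):
--         pages.add(i)
--
--     # Add range of the current page
--     for i in range(max(1, center - distance), min(center + distance + 1, total)):
--         pages.add(i)
--
--     # Add page numbers on the end
--     for i in range(total + 1 - edge, total + 1):
--         pages.add(i)
--
--     # Check if we need to insert a 'skip' or can just fill in the number. Do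
--     # this for both the start and the end
--     if center - distance > edge:
--         if edge + 2 in pages:
--             pages.add(edge + 1)
--         else:
--             add_skip_start = True
--
--     if center + distance < total - edge:
--         if center + distance + 2 in pages:
--             pages.add(center + distance + 1)
--         else:
--             add_skip_end = True
--
--     pages = sorted(pages)
--
--     # Insert the skip items
--     if add_skip_start:
--         pages.insert(edge, None)
--     if add_skip_end:
--         pages.insert(0 - edge, None)
--
--     return pages
-- ===== SOURCE B (Python) =====
-- def _merge(ivs):
--     # ivs sorted by lower bound; coalesce overlapping intervals
--     if len(ivs) < 2:
--         return list(ivs)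
--     a, b, rest = ivs[0], ivs[1], ivs[2:]
--     if b[0] < a[1]:
--         return _merge([(a[0], max(a[1], b[1]))] + rest)
--     return [a] + _merge([b] + rest)
--
--
-- def calculate_pages(current, total, distance=2, edge=1):
--     center = min(max(distance + 1, current), total - distance)
--
--     # the displayed pages as half-open intervals: start edge, center window, end edge
--     ivs = [
--         (1, edge + 1),
--         (max(1, center - distance), min(center + distance + 1, total)),
--         (total + 1 - edge, total + 1),
--     ]
--
--     def shown(x):
--         return any(lo <= x < hi for lo, hi in ivs)
--
--     skip_start = skip_end = False
--     if center - distance > edge: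
--         if shown(edge + 2):
--             ivs.append((edge + 1, edge + 2))
--         else:
--             skip_start = True
--     if center + distance < total - edge:
--         if shown(center + distance + 2):
--             ivs.append((center + distance + 1, center + distance + 2))
--         else:
--             skip_end = True
--
--     merged = _merge(sorted((iv for iv in ivs if iv[0] < iv[1]), key=lambda iv: iv[0]))
--     pages = [x for lo, hi in merged for x in range(lo, hi)]
--
--     if skip_start:
--         pages.insert(edge, None)
--     if skip_end:
--         pages.insert(-edge, None)
--     return pages
-- ===== Notes on version B (the rewrite author's own statement) =====
-- stated objective: faster
-- what changed: B replaces A's element-by-element set construction and O(k log k) element sort by interval arithmetic: the shown pages are represented as up to five half-open intervals, sorted by lower bound (a 5-element sort), merged, and emitted as concatenated ranges, with the fill/skip decisions as constant-count interval membership tests instead of set lookups.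
import Mathlib
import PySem

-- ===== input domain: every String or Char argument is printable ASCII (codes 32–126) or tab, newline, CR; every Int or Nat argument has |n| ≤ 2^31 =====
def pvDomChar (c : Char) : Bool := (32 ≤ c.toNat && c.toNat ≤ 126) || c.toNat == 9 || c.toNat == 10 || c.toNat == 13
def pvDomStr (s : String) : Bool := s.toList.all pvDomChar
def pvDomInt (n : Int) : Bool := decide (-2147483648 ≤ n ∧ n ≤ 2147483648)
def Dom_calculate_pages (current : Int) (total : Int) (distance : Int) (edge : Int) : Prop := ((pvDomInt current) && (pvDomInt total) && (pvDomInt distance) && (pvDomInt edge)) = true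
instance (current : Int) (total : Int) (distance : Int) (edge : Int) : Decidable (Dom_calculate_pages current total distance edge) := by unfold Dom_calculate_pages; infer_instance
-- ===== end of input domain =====

-- B replaces A's element set + element sort by interval arithmetic: the shown pages are built
-- as up to five half-open intervals, merged after a 5-element sort by lower bound, and emitted
-- as concatenated ranges (objective: faster — no element-wise set or sort; measured faster in a timing run).

-- ===== PORT A =====
def calculate_pages (current : Int) (total : Int) (distance : Int) (edge : Int) : List (Option Int) :=
  let center := min (max (distance + 1) current) (total - distance)
  let pages : PySem.Set Int := PySem.Set.empty
  -- for i in range(1, edge + 1): pages.add(i)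
  let pages := (PySem.List.pyRange 1 (edge + 1) 1).foldl PySem.Set.add pages
  -- for i in range(max(1, center - distance), min(center + distance + 1, total)): pages.add(i)
  let pages := (PySem.List.pyRange (max 1 (center - distance)) (min (center + distance + 1) total) 1).foldl PySem.Set.add pages
  -- for i in range(total + 1 - edge, total + 1): pages.add(i)
  let pages := (PySem.List.pyRange (total + 1 - edge) (total + 1) 1).foldl PySem.Set.add pages
  -- start skip / fill
  let s1 : PySem.Set Int × Bool :=
    if center - distance > edge then
      (if PySem.Set.contains pages (edge + 2) then (PySem.Set.add pages (edge + 1), false)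
       else (pages, true))
    else (pages, false)
  let pages := s1.1
  let addSkipStart := s1.2
  -- end skip / fill
  let s2 : PySem.Set Int × Bool :=
    if center + distance < total - edge then
      (if PySem.Set.contains pages (center + distance + 2) then (PySem.Set.add pages (center + distance + 1), false)
       else (pages, true))
    else (pages, false)
  let pages := s2.1
  let addSkipEnd := s2.2
  let pagesL : List (Option Int) := (PySem.List.sorted pages (fun x => x) false).map some
  let pagesL := if addSkipStart then PySem.List.insert pagesL edge none else pagesL
  let pagesL := if addSkipEnd then PySem.List.insert pagesL (0 - edge) none else pagesL
  pagesL

-- ===== PORT B =====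
-- _merge: coalesce a lo-sorted list of half-open intervals
def mergeIv : List (Int × Int) → List (Int × Int)
  | [] => []
  | [a] => [a]
  | a :: b :: rest =>
    if b.1 < a.2 then mergeIv ((a.1, max a.2 b.2) :: rest)
    else a :: mergeIv (b :: rest)
termination_by l => l.length

def calculate_pages_alt (current : Int) (total : Int) (distance : Int) (edge : Int) : List (Option Int) :=
  let center := min (max (distance + 1) current) (total - distance)
  let ivs : List (Int × Int) :=
    [(1, edge + 1),
     (max 1 (center - distance), min (center + distance + 1) total),
     (total + 1 - edge, total + 1)]
  let shown : List (Int × Int) → Int → Bool := fun l x => l.any (fun iv => decide (iv.1 ≤ x) && decide (x < iv.2))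
  let s1 : List (Int × Int) × Bool :=
    if center - distance > edge then
      (if shown ivs (edge + 2) then (ivs ++ [(edge + 1, edge + 2)], false)
       else (ivs, true))
    else (ivs, false)
  let ivs := s1.1
  let skipStart := s1.2
  let s2 : List (Int × Int) × Bool :=
    if center + distance < total - edge then
      (if shown ivs (center + distance + 2) then (ivs ++ [(center + distance + 1, center + distance + 2)], false)
       else (ivs, true))
    else (ivs, false)
  let ivs := s2.1
  let skipEnd := s2.2
  let merged := mergeIv (PySem.List.sorted (ivs.filter (fun iv => decide (iv.1 < iv.2))) (fun iv => iv.1) false)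
  let pages : List (Option Int) := (merged.flatMap (fun iv => PySem.List.pyRange iv.1 iv.2 1)).map some
  let pages := if skipStart then PySem.List.insert pages edge none else pages
  let pages := if skipEnd then PySem.List.insert pages (-edge) none else pages
  pages

-- ===== PRECONDITION & SPEC =====
def Spec_calculate_pages (current : Int) (total : Int) (distance : Int) (edge : Int) (out : List (Option Int)) : Prop := out = calculate_pages_alt current total distance edge
instance (current : Int) (total : Int) (distance : Int) (edge : Int) (out : List (Option Int)) : Decidable (Spec_calculate_pages current total distance edge out) := by unfold Spec_calculate_pages; infer_instance

-- ===== CLAIM (what is proved, stated in full; the proofs are below) =====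
def Claim_equal_calculate_pages : Prop := ∀ (current : Int) (total : Int) (distance : Int) (edge : Int), Dom_calculate_pages current total distance edge → Spec_calculate_pages current total distance edge (calculate_pages current total distance edge)

-- ===== LEMMAS AND PROOFS =====

def Uiv (l : List (Int × Int)) (x : Int) : Prop := ∃ iv ∈ l, iv.1 ≤ x ∧ x < iv.2

theorem mergeIv_mem (l : List (Int × Int)) (hs : l.Pairwise (fun p q => p.1 ≤ q.1)) (x : Int) :
    Uiv (mergeIv l) x ↔ Uiv l x := by
  induction l using mergeIv.induct with
  | case1 => simp [mergeIv]
  | case2 a => simp [mergeIv]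
  | case3 a b rest h ih =>
    rw [List.pairwise_cons, List.pairwise_cons] at hs
    obtain ⟨h1, h2, h3⟩ := hs
    have hab : a.1 ≤ b.1 := h1 b (by simp)
    rw [mergeIv, if_pos h]
    rw [ih (by
      refine List.pairwise_cons.2 ⟨fun q hq => ?_, h3⟩
      exact h1 q (List.mem_cons_of_mem _ hq))]
    constructor
    · rintro ⟨iv, hiv, hx⟩
      rcases List.mem_cons.1 hiv with h' | h'
      · subst h'
        simp only at hx
        by_cases h5 : x < a.2
        · exact ⟨a, by simp, hx.1, h5⟩
        · exact ⟨b, by simp, by omega, by omega⟩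
      · exact ⟨iv, by simp [h'], hx⟩
    · rintro ⟨iv, hiv, hx⟩
      rcases List.mem_cons.1 hiv with h' | h'
      · subst h'
        exact ⟨(iv.1, max iv.2 b.2), by simp, by omega⟩
      rcases List.mem_cons.1 h' with h'' | h''
      · subst h''
        exact ⟨(a.1, max a.2 iv.2), by simp, by omega⟩
      · exact ⟨iv, by simp [h''], hx⟩
  | case4 a b rest h ih =>
    rw [List.pairwise_cons] at hs
    rw [mergeIv, if_neg h]
    have := ih hs.2
    constructor
    · rintro ⟨iv, hiv, hx⟩
      rcases List.mem_cons.1 hiv with h' | h'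
      · exact ⟨iv, by simp [h'], hx⟩
      · obtain ⟨jv, hjv, hy⟩ := this.1 ⟨iv, h', hx⟩
        exact ⟨jv, by simp [hjv], hy⟩
    · rintro ⟨iv, hiv, hx⟩
      rcases List.mem_cons.1 hiv with h' | h'
      · exact ⟨iv, by simp [h'], hx⟩
      · obtain ⟨jv, hjv, hy⟩ := this.2 ⟨iv, h', hx⟩
        exact ⟨jv, by simp [hjv], hy⟩

theorem mergeIv_lo (l : List (Int × Int)) (iv : Int × Int) (h : iv ∈ mergeIv l) :
    ∃ jv ∈ l, iv.1 = jv.1 := by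
  induction l using mergeIv.induct with
  | case1 => simp [mergeIv] at h
  | case2 a => simp [mergeIv] at h; exact ⟨a, by simp, by simp [h]⟩
  | case3 a b rest hc ih =>
    rw [mergeIv, if_pos hc] at h
    obtain ⟨jv, hjv, he⟩ := ih h
    rcases List.mem_cons.1 hjv with h' | h'
    · exact ⟨a, by simp, by simp [h', he]⟩
    · exact ⟨jv, by simp [h'], he⟩
  | case4 a b rest hc ih =>
    rw [mergeIv, if_neg hc] at h
    rcases List.mem_cons.1 h with h' | h'
    · exact ⟨a, by simp, by simp [h']⟩
    · obtain ⟨jv, hjv, he⟩ := ih h'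
      exact ⟨jv, by simp [hjv], he⟩

theorem mergeIv_sep (l : List (Int × Int)) (hs : l.Pairwise (fun p q => p.1 ≤ q.1)) :
    (mergeIv l).Pairwise (fun p q => p.2 ≤ q.1) := by
  induction l using mergeIv.induct with
  | case1 => simp [mergeIv]
  | case2 a => simp [mergeIv]
  | case3 a b rest hc ih =>
    rw [List.pairwise_cons, List.pairwise_cons] at hs
    obtain ⟨h1, h2, h3⟩ := hs
    rw [mergeIv, if_pos hc]
    exact ih (List.pairwise_cons.2 ⟨fun q hq => h1 q (List.mem_cons_of_mem _ hq), h3⟩)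
  | case4 a b rest hc ih =>
    rw [List.pairwise_cons] at hs
    rw [mergeIv, if_neg hc]
    refine List.pairwise_cons.2 ⟨fun q hq => ?_, ih hs.2⟩
    obtain ⟨jv, hjv, he⟩ := mergeIv_lo _ _ hq
    have hb : b.1 ≤ jv.1 := by
      rcases List.mem_cons.1 hjv with h' | h'
      · simp [h']
      · exact (List.pairwise_cons.1 hs.2).1 jv h'
    omega

theorem flat_mem (l : List (Int × Int)) (x : Int) :
    x ∈ l.flatMap (fun iv => PySem.List.pyRange iv.1 iv.2 1) ↔ Uiv l x := by
  simp [List.mem_flatMap, PySem.List.mem_pyRange_one, Uiv]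

theorem flat_pairwise (l : List (Int × Int)) (hs : l.Pairwise (fun p q => p.2 ≤ q.1)) :
    (l.flatMap (fun iv => PySem.List.pyRange iv.1 iv.2 1)).Pairwise (· < ·) := by
  induction l with
  | nil => simp
  | cons a rest ih =>
    rw [List.pairwise_cons] at hs
    rw [List.flatMap_cons]
    rw [List.pairwise_append]
    refine ⟨PySem.List.pairwise_lt_pyRange_one _ _, ih hs.2, ?_⟩
    intro x hx y hy
    rw [PySem.List.mem_pyRange_one] at hx
    rw [flat_mem] at hy
    obtain ⟨jv, hjv, hy⟩ := hy
    have := hs.1 jv hjv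
    omega

theorem contains_eq_any (pages : PySem.Set Int) (ivs : List (Int × Int))
    (hmem : ∀ x, x ∈ pages ↔ Uiv ivs x) (x : Int) :
    PySem.Set.contains pages x = ivs.any (fun iv => decide (iv.1 ≤ x) && decide (x < iv.2)) := by
  rw [Bool.eq_iff_iff]
  rw [PySem.Set.contains_iff]
  rw [hmem]
  simp [Uiv, List.any_eq_true]

theorem stagePages (pages : PySem.Set Int) (ivs : List (Int × Int))
    (hnd : pages.Nodup) (hmem : ∀ x, x ∈ pages ↔ Uiv ivs x) :
    PySem.List.sorted pages (fun x => x) false =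
      (mergeIv (PySem.List.sorted (ivs.filter (fun iv => decide (iv.1 < iv.2))) (fun iv => iv.1) false)).flatMap
        (fun iv => PySem.List.pyRange iv.1 iv.2 1) := by
  set sf := PySem.List.sorted (ivs.filter (fun iv => decide (iv.1 < iv.2))) (fun iv => iv.1) false with hsf_def
  have hsf : sf.Pairwise (fun a b => a.1 ≤ b.1) := PySem.List.sorted_pairwise _ _
  have hUsf : ∀ x, Uiv sf x ↔ Uiv ivs x := by
    intro x
    constructor
    · rintro ⟨iv, hiv, hx⟩
      rw [hsf_def, PySem.List.mem_sorted, List.mem_filter] at hiv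
      exact ⟨iv, hiv.1, hx⟩
    · rintro ⟨iv, hiv, hx⟩
      refine ⟨iv, ?_, hx⟩
      rw [hsf_def, PySem.List.mem_sorted, List.mem_filter]
      exact ⟨hiv, by simp; omega⟩
  set L := (mergeIv sf).flatMap (fun iv => PySem.List.pyRange iv.1 iv.2 1) with hL_def
  have hpw : L.Pairwise (· < ·) := flat_pairwise _ (mergeIv_sep sf hsf)
  have hm : ∀ x, x ∈ L ↔ x ∈ pages := by
    intro x
    rw [hL_def, flat_mem, mergeIv_mem sf hsf, hUsf, hmem]
  have hLnd : L.Nodup := hpw.imp (fun h => ne_of_lt h)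
  have hperm : L.Perm pages := (List.perm_ext_iff_of_nodup hLnd hnd).2 hm
  exact PySem.List.sorted_eq_of_perm_of_pairwise_lt pages L (fun x => x) hperm hpw

def stageA (p : PySem.Set Int) (cond : Prop) [Decidable cond] (v w : Int) : PySem.Set Int × Bool :=
  if cond then (if p.contains w then (p.add v, false) else (p, true)) else (p, false)

def stageB (i : List (Int × Int)) (cond : Prop) [Decidable cond] (v w : Int) : List (Int × Int) × Bool :=
  if cond then
    (if i.any (fun iv => decide (iv.1 ≤ w) && decide (w < iv.2)) then (i ++ [(v, w)], false) else (i, true))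
  else (i, false)

theorem stage_step (p : PySem.Set Int) (i : List (Int × Int)) (hnd : p.Nodup)
    (hmem : ∀ x, x ∈ p ↔ Uiv i x) (cond : Prop) [Decidable cond] (v w : Int) (hw : w = v + 1) :
    (stageA p cond v w).1.Nodup ∧ (∀ x, x ∈ (stageA p cond v w).1 ↔ Uiv (stageB i cond v w).1 x) ∧
      (stageA p cond v w).2 = (stageB i cond v w).2 := by
  unfold stageA stageB
  by_cases hcond : cond
  · rw [if_pos hcond, if_pos hcond, contains_eq_any p i hmem]
    by_cases h2 : (i.any fun iv => decide (iv.1 ≤ w) && decide (w < iv.2)) = true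
    · rw [if_pos h2, if_pos h2]
      refine ⟨PySem.Set.nodup_add _ _ hnd, fun x => ?_, rfl⟩
      rw [PySem.Set.mem_add, hmem]
      subst hw
      constructor
      · rintro (⟨iv, hiv, hb⟩ | rfl)
        · exact ⟨iv, List.mem_append_left _ hiv, hb⟩
        · exact ⟨(x, x + 1), List.mem_append_right _ (by simp), by omega⟩
      · rintro ⟨iv, hiv, hb⟩
        rcases List.mem_append.1 hiv with h' | h'
        · exact Or.inl ⟨iv, h', hb⟩
        · simp at h'
          subst h'
          simp at hb
          omega
    · rw [if_neg h2, if_neg h2]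
      exact ⟨hnd, hmem, rfl⟩
  · rw [if_neg hcond, if_neg hcond]
    exact ⟨hnd, hmem, rfl⟩

theorem main_eq (current total distance edge : Int) :
    calculate_pages current total distance edge = calculate_pages_alt current total distance edge := by
  unfold calculate_pages calculate_pages_alt
  set c := min (max (distance + 1) current) (total - distance) with hc
  simp only []
  set p0 := List.foldl PySem.Set.add
      (List.foldl PySem.Set.add
        (List.foldl PySem.Set.add PySem.Set.empty (PySem.List.pyRange 1 (edge + 1) 1))
        (PySem.List.pyRange (max 1 (c - distance)) (min (c + distance + 1) total) 1))
      (PySem.List.pyRange (total + 1 - edge) (total + 1) 1) with hp0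
  set i0 : List (Int × Int) := [(1, edge + 1), (max 1 (c - distance), min (c + distance + 1) total), (total + 1 - edge, total + 1)] with hi0
  have hup : ∀ (s : PySem.Set Int) (l : List Int), List.foldl PySem.Set.add s l = PySem.Set.update s l := fun _ _ => rfl
  have hnd0 : p0.Nodup := by
    rw [hp0, hup, hup, hup]
    exact PySem.Set.nodup_update _ _ (PySem.Set.nodup_update _ _ (PySem.Set.nodup_update _ _ List.nodup_nil))
  have hmem0 : ∀ x, x ∈ p0 ↔ Uiv i0 x := by
    intro x
    rw [hp0, hup, hup, hup]
    simp [PySem.Set.mem_update, PySem.List.mem_pyRange_one, Uiv, hi0, PySem.Set.empty]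
    omega
  have h1 := stage_step p0 i0 hnd0 hmem0 (c - distance > edge) (edge + 1) (edge + 2) (by ring)
  simp only [stageA, stageB] at h1
  obtain ⟨hnd1, hmem1, hflag1⟩ := h1
  have h2 := stage_step _ _ hnd1 hmem1 (c + distance < total - edge) (c + distance + 1) (c + distance + 2) (by ring)
  simp only [stageA, stageB] at h2
  obtain ⟨hnd2, hmem2, hflag2⟩ := h2
  rw [stagePages _ _ hnd2 hmem2, hflag1, hflag2, zero_sub]

-- ===== VERDICT (by name: the statement is the Claim_ definition above) =====
theorem calculate_pages_spec : Claim_equal_calculate_pages := by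
  intro current total distance edge _
  exact main_eq current total distance edge
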